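-- pv_equiv track=rewrite | github.com/Inkjourney/agentkit | src/agentkit/tools/library/view.py | _format_directory_tree
-- ===== SOURCE A (Python) =====
-- from typing import Any
--
-- def _format_directory_tree(path: str, entries: list[dict[str, Any]]) -> str:
--     """Convert flattened directory entries into a printable tree."""
--     root: dict[str, Any] = {"children": {}}
--     for entry in entries:
--         entry_path = entry.get("path")
--         kind = entry.get("kind")
--         if not isinstance(entry_path, str) or not isinstance(kind, str):
--             continue
--         parts = [part for part in entry_path.split("/") if part]
--         node = root
--         for index, part in enumerate(parts):
--             children = node.setdefault("children", {})
--             child = children.setdefault(part, {"kind": "directory", "children": {}})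
--             if index == len(parts) - 1:
--                 child["kind"] = kind
--             node = child
--
--     lines = [_display_directory_path(path)]
--     lines.extend(_render_tree_children(root.get("children", {}), prefix=""))
--     return "\n".join(lines)
--
-- def _render_tree_children(children: dict[str, Any], *, prefix: str) -> list[str]:
--     """Render one nested tree level using box-drawing characters."""
--     lines: list[str] = []
--     items = list(children.items())
--     for index, (name, node) in enumerate(items):
--         is_last = index == len(items) - 1
--         connector = "└──" if is_last else "├──"
--         kind = node.get("kind")
--         suffix = "/" if kind == "directory" else ""
--         lines.append(f"{prefix}{connector} {name}{suffix}")
--         child_children = node.get("children", {})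
--         if isinstance(child_children, dict) and child_children:
--             next_prefix = prefix + ("    " if is_last else "│   ")
--             lines.extend(_render_tree_children(child_children, prefix=next_prefix))
--     return lines
--
-- def _display_directory_path(path: str) -> str:
--     """Normalize the root label shown for directory listings."""
--     if path in {".", "./"}:
--         return "./"
--     return path if path.endswith("/") else f"{path}/"
-- ===== SOURCE B (Python) =====
-- def _format_directory_tree(path, entries):
--     """Convert flattened directory entries into a printable tree (iterative rendering)."""
--     root = {"children": {}}
--     for entry in entries:
--         entry_path = entry.get("path")
--         kind = entry.get("kind")
--         if not isinstance(entry_path, str) or not isinstance(kind, str):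
--             continue
--         parts = [part for part in entry_path.split("/") if part]
--         node = root
--         for index, part in enumerate(parts):
--             children = node.setdefault("children", {})
--             child = children.setdefault(part, {"kind": "directory", "children": {}})
--             if index == len(parts) - 1:
--                 child["kind"] = kind
--             node = child
--
--     lines = [_display_directory_path(path)]
--     stack = []
--
--     def push_children(children, prefix):
--         items = list(children.items())
--         for i in range(len(items) - 1, -1, -1):
--             name, node = items[i]
--             stack.append((name, node, prefix, i == len(items) - 1))
--
--     push_children(root["children"], "")
--     while stack:
--         name, node, prefix, is_last = stack.pop()
--         connector = "└──" if is_last else "├──"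
--         suffix = "/" if node.get("kind") == "directory" else ""
--         lines.append(f"{prefix}{connector} {name}{suffix}")
--         child_children = node.get("children", {})
--         if child_children:
--             push_children(child_children, prefix + ("    " if is_last else "│   "))
--     return "\n".join(lines)
--
--
-- def _display_directory_path(path):
--     if path in {".", "./"}:
--         return "./"
--     return path if path.endswith("/") else f"{path}/"
-- ===== Notes on version B (the rewrite author's own statement) =====
-- stated objective: alternative
-- what changed: The tree-building phase is kept, but the recursive _render_tree_children is replaced by an explicit iterative DFS over a stack of (name, node, prefix, is_last) frames, pushing children in reverse so they are popped in insertion order.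
import Mathlib
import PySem

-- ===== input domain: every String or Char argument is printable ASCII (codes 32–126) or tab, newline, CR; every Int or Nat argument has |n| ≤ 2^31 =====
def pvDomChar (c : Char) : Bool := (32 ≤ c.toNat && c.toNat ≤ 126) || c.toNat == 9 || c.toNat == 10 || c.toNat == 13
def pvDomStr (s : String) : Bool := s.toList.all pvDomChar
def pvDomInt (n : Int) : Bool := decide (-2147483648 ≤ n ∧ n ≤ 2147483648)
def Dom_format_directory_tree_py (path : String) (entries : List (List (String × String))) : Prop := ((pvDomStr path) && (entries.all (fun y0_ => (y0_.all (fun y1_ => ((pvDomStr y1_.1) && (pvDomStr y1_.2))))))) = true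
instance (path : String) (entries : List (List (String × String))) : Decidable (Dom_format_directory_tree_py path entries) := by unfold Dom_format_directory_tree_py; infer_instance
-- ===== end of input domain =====

-- One honest line: B keeps A's tree-building phase but renders the tree with an explicit
-- iterative DFS over a stack of (name, kind, children, prefix, is_last) frames instead of
-- A's recursive _render_tree_children (objective: alternative decomposition, same cost).

-- ===== PORT A =====
-- the nested dicts {"kind": …, "children": {…}} of the Python: an insertion-ordered
-- children map with unique keys; 'cons name kind children rest' is one (name, node) item
inductive PChildren where
  | nil
  | cons : String → String → PChildren → PChildren → PChildren
deriving Repr, DecidableEq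

def PChildren.isNil : PChildren → Bool
  | .nil => true
  | .cons _ _ _ _ => false

-- the inner 'for index, part in enumerate(parts)' loop of A (and B): walk/extend the
-- children maps along parts; setdefault appends a fresh {"kind":"directory","children":{}},
-- and on the last part child["kind"] = kind
def pvInsertPath (cs : PChildren) (parts : List String) (kind : String) : PChildren :=
  match parts, cs with
  | [], cs => cs
  | p :: rest, .nil =>
      .cons p (if rest.isEmpty then kind else "directory") (pvInsertPath .nil rest kind) .nil
  | p :: rest, .cons n k c cs' =>
      if n == p then
        .cons n (if rest.isEmpty then kind else k) (pvInsertPath c rest kind) cs'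
      else
        .cons n k c (pvInsertPath cs' (p :: rest) kind)
termination_by (parts.length, sizeOf cs)
decreasing_by all_goals (simp_all; omega)

-- the outer 'for entry in entries' loop building root["children"] (shared by A and B,
-- which keep the build phase identical); entry.get with Python dict semantics;
-- entry_path.split("/") via PySem.Str.split? ("/" ≠ "" so it never returns none)
def pvBuildChildren (entries : List (List (String × String))) : PChildren :=
  entries.foldl (fun cs entry =>
    match (PySem.Dict.ofList entry).get? "path", (PySem.Dict.ofList entry).get? "kind" with
    | some ep, some kind =>
        pvInsertPath cs (((PySem.Str.split? ep "/").getD []).filter (fun part => part ≠ "")) kind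
    | _, _ => cs) PChildren.nil

def pvDisplayPath (path : String) : String :=
  if path == "." || path == "./" then "./"
  else if PySem.Str.endswith path "/" then path else path ++ "/"

-- A's recursive _render_tree_children
def pvRenderRec : PChildren → String → List String
  | .nil, _ => []
  | .cons name kind c rest, pre =>
      let isLast := rest.isNil
      let line := pre ++ (if isLast then "└──" else "├──") ++ " " ++ name
                      ++ (if kind == "directory" then "/" else "")
      let sub := if c.isNil then [] else
                   pvRenderRec c (pre ++ (if isLast then "    " else "│   "))
      line :: sub ++ pvRenderRec rest pre

def format_directory_tree_py (path : String) (entries : List (List (String × String))) : String :=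
  PySem.Str.join "\n" (pvDisplayPath path :: pvRenderRec (pvBuildChildren entries) "")

-- ===== PORT B =====
-- B's push_children: the frames of one children map, in order (the Python pushes them
-- reversed onto the stack and pops from the end, i.e. consumes them in this order)
def pvFramesOf : PChildren → String → List (String × String × PChildren × String × Bool)
  | .nil, _ => []
  | .cons n k c rest, pre => (n, k, c, pre, rest.isNil) :: pvFramesOf rest pre

theorem pvFramesOf_measure (c : PChildren) (pre : String) :
    ((pvFramesOf c pre).map (fun f => sizeOf f.2.2.1)).sum < sizeOf c := by
  induction c generalizing pre with
  | nil => simp [pvFramesOf]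
  | cons n k cc rest ih1 ih2 => simp [pvFramesOf]; have := ih2 pre; omega

-- B's while-loop: pop a frame, emit its line, push its children's frames
def pvRenderStack : List (String × String × PChildren × String × Bool) → List String
  | [] => []
  | (name, kind, c, pre, isLast) :: stack =>
      let line := pre ++ (if isLast then "└──" else "├──") ++ " " ++ name
                      ++ (if kind == "directory" then "/" else "")
      let pushed := if c.isNil then [] else
                      pvFramesOf c (pre ++ (if isLast then "    " else "│   "))
      line :: pvRenderStack (pushed ++ stack)
termination_by stack => ((stack.map (fun f => sizeOf f.2.2.1)).sum, stack.length)
decreasing_by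
  simp only [List.map_append, List.sum_append]
  split
  · simp; omega
  · have := pvFramesOf_measure c (pre ++ (if isLast then "    " else "│   "))
    left; simp; omega

def format_directory_tree_py_alt (path : String) (entries : List (List (String × String))) : String :=
  PySem.Str.join "\n" (pvDisplayPath path :: pvRenderStack (pvFramesOf (pvBuildChildren entries) ""))

-- ===== PRECONDITION & SPEC =====
def Spec_format_directory_tree_py (path : String) (entries : List (List (String × String))) (out : String) : Prop := out = format_directory_tree_py_alt path entries
instance (path : String) (entries : List (List (String × String))) (out : String) : Decidable (Spec_format_directory_tree_py path entries out) := by unfold Spec_format_directory_tree_py; infer_instance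

-- ===== CLAIM (what is proved, stated in full; the proofs are below) =====
def Claim_equal_format_directory_tree_py : Prop := ∀ (path : String) (entries : List (List (String × String))), Dom_format_directory_tree_py path entries → Spec_format_directory_tree_py path entries (format_directory_tree_py path entries)

-- ===== LEMMAS AND PROOFS =====

-- what one frame contributes to the output (its line, then its rendered subtree)
def pvFrameOut : String × String × PChildren × String × Bool → List String
  | (name, kind, c, pre, isLast) =>
      (pre ++ (if isLast then "└──" else "├──") ++ " " ++ name
           ++ (if kind == "directory" then "/" else "")) ::
      (if c.isNil then [] else pvRenderRec c (pre ++ (if isLast then "    " else "│   ")))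

theorem pvRenderRec_eq_flatMap (c : PChildren) (pre : String) :
    pvRenderRec c pre = (pvFramesOf c pre).flatMap pvFrameOut := by
  induction c generalizing pre with
  | nil => simp [pvRenderRec, pvFramesOf]
  | cons n k cc rest ih1 ih2 => simp [pvRenderRec, pvFramesOf, pvFrameOut, ih2]

theorem pvRenderStack_eq_flatMap (stack : List (String × String × PChildren × String × Bool)) :
    pvRenderStack stack = stack.flatMap pvFrameOut := by
  induction stack using pvRenderStack.induct with
  | case1 => simp [pvRenderStack]
  | case2 name kind c pre isLast rest h8 ih =>
      simp only [pvRenderStack]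
      have hh : h8 = (if c.isNil = true then [] else
          pvFramesOf c (pre ++ if isLast = true then "    " else "│   ")) := rfl
      rw [hh] at ih
      rw [ih]
      simp only [List.flatMap_cons, List.flatMap_append, pvFrameOut]
      congr 1
      by_cases h : c.isNil <;> simp [h, pvRenderRec_eq_flatMap]

-- ===== VERDICT (by name: the statement is the Claim_ definition above) =====
theorem format_directory_tree_py_spec : Claim_equal_format_directory_tree_py := by
  intro path entries _
  unfold Spec_format_directory_tree_py format_directory_tree_py format_directory_tree_py_alt
  rw [pvRenderStack_eq_flatMap, ← pvRenderRec_eq_flatMap]
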